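-- pv_equiv track=rewrite | github.com/LoganFriedrich/MouseBrain | src/mousebrain/analysis_registry.py | parse_sample_id
-- ===== SOURCE A (Python) =====
-- from typing import Any, Dict, List, Optional, Tuple
--
-- def parse_sample_id(sample: str) -> Tuple[str, str]:
--     """Extract animal ID and region from a sample name.
--
--     Handles formats like:
--         "E02_01_S13_DCN"     -> ("E02_01", "DCN")
--         "E02_01_S13_DCNv2"   -> ("E02_01", "DCNv2")
--         "E02_01_S17_DCN001"  -> ("E02_01", "DCN001")
--         "E02_01_S1_R3"       -> ("E02_01", "R3")
--
--     The convention is: {animal_prefix}_{animal_num}_S{slice}_{region_suffix}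
--     where animal = first two underscore-separated parts, and region = everything
--     after the S{N}_ token.
--
--     Args:
--         sample: Sample identifier string (typically the ND2 filename stem).
--
--     Returns:
--         Tuple of (animal_id, region). If parsing fails, returns (sample, "").
--     """
--     parts = sample.split("_")
--     if len(parts) < 3:
--         return (sample, "")
--
--     # Animal is always the first two parts (e.g. E02_01)
--     animal = f"{parts[0]}_{parts[1]}"
--
--     # Find the slice token (S followed by digits)
--     region_parts = []
--     found_slice = False
--     for part in parts[2:]:
--         if not found_slice and part.startswith("S") and len(part) > 1 and part[1:].isdigit():
--             found_slice = True
--             continue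
--         if found_slice:
--             region_parts.append(part)
--
--     region = "_".join(region_parts) if region_parts else ""
--
--     # Normalize region: strip trailing version digits for the base region name
--     # but keep the full string for sample-level identification
--     return (animal, region)
-- ===== SOURCE B (Python) =====
-- def _region_after_slice(toks):
--     # Recursively locate the first S<digits> token; the region is everything after it.
--     if not toks:
--         return ""
--     head, rest = toks[0], toks[1:]
--     if head.startswith("S") and len(head) > 1 and head[1:].isdigit():
--         return "_".join(rest)
--     return _region_after_slice(rest)
--
--
-- def parse_sample_id(sample):
--     parts = sample.split("_")
--     if len(parts) < 3:
--         return (sample, "")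
--     animal = f"{parts[0]}_{parts[1]}"
--     return (animal, _region_after_slice(parts[2:]))
-- ===== Notes on version B (the rewrite author's own statement) =====
-- stated objective: simpler
-- what changed: Replaces A's flag-carrying scan-and-accumulate loop with a recursive helper that locates the first S<digits> token and returns the join of everything after it (locate-boundary-then-slice instead of accumulate-with-flag).
import Mathlib
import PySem

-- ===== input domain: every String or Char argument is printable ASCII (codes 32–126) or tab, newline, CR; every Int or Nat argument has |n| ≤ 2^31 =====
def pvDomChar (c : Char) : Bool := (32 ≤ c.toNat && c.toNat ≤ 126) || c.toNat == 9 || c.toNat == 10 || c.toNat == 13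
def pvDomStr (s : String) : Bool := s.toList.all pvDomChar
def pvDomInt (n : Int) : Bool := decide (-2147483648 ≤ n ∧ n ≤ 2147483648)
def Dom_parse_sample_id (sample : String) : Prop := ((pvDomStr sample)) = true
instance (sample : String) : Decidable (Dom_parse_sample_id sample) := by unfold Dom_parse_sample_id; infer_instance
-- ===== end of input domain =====

-- B replaces A's flag-carrying scan-and-accumulate loop with a recursive locate-the-slice-token-then-join-the-rest decomposition (objective: simpler).

-- ===== PORT A =====
-- shared token test: part.startswith("S") and len(part) > 1 and part[1:].isdigit()  (identical text in both Pythons)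
def pvTok (part : String) : Bool :=
  PySem.Str.startswith part "S" && decide (1 < PySem.Str.len part) &&
    PySem.Str.strIsdigit (PySem.Str.slice part (some 1) none)

def parse_sample_id (sample : String) : String × String :=
  let parts := (PySem.Str.split? sample "_").getD []
  if parts.length < 3 then (sample, "")
  else
    let animal := PySem.Str.join "" [parts.getD 0 "", "_", parts.getD 1 ""]
    let st := (PySem.List.slice parts (some 2) none).foldl
      (fun (st : List String × Bool) part =>
        if !st.2 && pvTok part then (st.1, true)
        else if st.2 then (st.1 ++ [part], st.2)
        else st) ([], false)
    let region := if st.1.isEmpty then "" else PySem.Str.join "_" st.1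
    (animal, region)

-- ===== PORT B =====
def pvRegionAfterSlice (toks : List String) : String :=
  match toks with
  | [] => ""
  | head :: rest => if pvTok head then PySem.Str.join "_" rest else pvRegionAfterSlice rest

def parse_sample_id_alt (sample : String) : String × String :=
  let parts := (PySem.Str.split? sample "_").getD []
  if parts.length < 3 then (sample, "")
  else
    let animal := PySem.Str.join "" [parts.getD 0 "", "_", parts.getD 1 ""]
    (animal, pvRegionAfterSlice (PySem.List.slice parts (some 2) none))

-- ===== PRECONDITION & SPEC =====
def Spec_parse_sample_id (sample : String) (out : String × String) : Prop := out = parse_sample_id_alt sample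
instance (sample : String) (out : String × String) : Decidable (Spec_parse_sample_id sample out) := by unfold Spec_parse_sample_id; infer_instance

-- ===== CLAIM (what is proved, stated in full; the proofs are below) =====
def Claim_equal_parse_sample_id : Prop := ∀ (sample : String), Dom_parse_sample_id sample → Spec_parse_sample_id sample (parse_sample_id sample)

-- ===== LEMMAS AND PROOFS =====

-- A's loop step
def pvStep (st : List String × Bool) (part : String) : List String × Bool :=
  if !st.2 && pvTok part then (st.1, true)
  else if st.2 then (st.1 ++ [part], st.2)
  else st

-- once the flag is set, the loop appends everything
theorem pvStep_foldl_true (l : List String) (acc : List String) :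
    l.foldl pvStep (acc, true) = (acc ++ l, true) := by
  induction l generalizing acc with
  | nil => simp
  | cons h t ih => simp [pvStep, ih]

-- "" is the join of the empty list, so A's 'if region_parts else ""' collapses
theorem pv_if_empty_join (l : List String) :
    (if l.isEmpty then "" else PySem.Str.join "_" l) = PySem.Str.join "_" l := by
  cases l with
  | nil => rfl
  | cons h t => rfl

-- A's loop step on a still-unset flag
theorem pvStep_false (acc : List String) (h : String) :
    pvStep (acc, false) h = if pvTok h then (acc, true) else (acc, false) := by
  simp [pvStep]

-- A's scan from the initial state computes B's recursive region
theorem pv_loop_eq_region (l : List String) :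
    (if (l.foldl pvStep ([], false)).1.isEmpty then ""
     else PySem.Str.join "_" (l.foldl pvStep ([], false)).1) = pvRegionAfterSlice l := by
  induction l with
  | nil => rfl
  | cons h t ih =>
    rw [List.foldl_cons, pvStep_false]
    by_cases htok : pvTok h = true
    · rw [if_pos htok, pvStep_foldl_true t [], pvRegionAfterSlice, if_pos htok]
      simpa using pv_if_empty_join t
    · rw [if_neg htok, pvRegionAfterSlice, if_neg htok]
      exact ih

-- ===== VERDICT (by name: the statement is the Claim_ definition above) =====
theorem parse_sample_id_spec : Claim_equal_parse_sample_id := by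
  intro sample _
  simp only [Spec_parse_sample_id, parse_sample_id, parse_sample_id_alt]
  by_cases h : ((PySem.Str.split? sample "_").getD []).length < 3
  · rw [if_pos h, if_pos h]
  · rw [if_neg h, if_neg h]
    exact congrArg _ (pv_loop_eq_region _)
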